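-- pv_equiv track=rewrite | github.com/cake2000/CreatiCodeSkillMap | optimize_t09.py | fix_g4_05_deps
-- ===== SOURCE A (Python) =====
-- def fix_g4_05_deps(original_lines):
--     """Add missing dependencies to G4.05"""
--     new_lines = []
--     deps_added = False
--     for line in original_lines:
--         new_lines.append(line)
--         if line.startswith('Dependencies:') and not deps_added:
--             # Add missing dependencies after the Dependencies: line
--             new_lines.append('* T09.G3.01.04: Display variable value on stage using the variable monitor\n')
--             new_lines.append('* T09.G3.02: Use change block to increase a variable\n')
--             deps_added = True
--     return new_lines
-- ===== SOURCE B (Python) =====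
-- DEP1 = '* T09.G3.01.04: Display variable value on stage using the variable monitor\n'
-- DEP2 = '* T09.G3.02: Use change block to increase a variable\n'
--
-- def fix_g4_05_deps(original_lines):
--     """Add missing dependencies to G4.05 (locate the first 'Dependencies:' header, then splice)."""
--     lines = list(original_lines)
--     for i, line in enumerate(lines):
--         if line.startswith('Dependencies:'):
--             return lines[:i + 1] + [DEP1, DEP2] + lines[i + 1:]
--     return lines
-- ===== Notes on version B (the rewrite author's own statement) =====
-- stated objective: simpler
-- what changed: Replaces the build-while-scanning loop with a two-bool-state by locate-the-first-header-then-splice (slices around the found index; plain copy if absent).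
import Mathlib
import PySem

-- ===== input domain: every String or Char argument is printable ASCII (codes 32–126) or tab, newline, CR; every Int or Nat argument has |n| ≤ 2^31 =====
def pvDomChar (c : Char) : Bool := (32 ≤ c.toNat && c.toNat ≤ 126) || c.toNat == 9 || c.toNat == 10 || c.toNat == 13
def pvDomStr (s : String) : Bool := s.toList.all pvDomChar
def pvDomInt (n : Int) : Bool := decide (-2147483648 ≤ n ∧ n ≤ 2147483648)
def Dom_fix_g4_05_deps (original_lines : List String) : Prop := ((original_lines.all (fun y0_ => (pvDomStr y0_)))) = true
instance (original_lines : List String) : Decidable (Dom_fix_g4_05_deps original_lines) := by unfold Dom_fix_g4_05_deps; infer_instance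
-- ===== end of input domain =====

-- B is 'simpler': it locates the first 'Dependencies:' header and splices the two lines in,
-- instead of A's build-while-scanning loop with a 'deps_added' flag.

def pvDep1 : String := "* T09.G3.01.04: Display variable value on stage using the variable monitor\n"
def pvDep2 : String := "* T09.G3.02: Use change block to increase a variable\n"

-- ===== PORT A =====
-- the loop body: append line; if it starts the header and deps not yet added, append the two deps
def pvStepA (acc : List String × Bool) (line : String) : List String × Bool :=
  let nl := acc.1 ++ [line]
  if PySem.Str.startswith line "Dependencies:" && !acc.2 then
    (nl ++ [pvDep1, pvDep2], true)
  else
    (nl, acc.2)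

def fix_g4_05_deps (original_lines : List String) : List String :=
  (original_lines.foldl pvStepA ([], false)).1

-- ===== PORT B =====
def fix_g4_05_deps_alt (original_lines : List String) : List String :=
  match original_lines.findIdx? (fun line => PySem.Str.startswith line "Dependencies:") with
  | some i => original_lines.take (i + 1) ++ [pvDep1, pvDep2] ++ original_lines.drop (i + 1)
  | none => original_lines

-- ===== PRECONDITION & SPEC =====
def Spec_fix_g4_05_deps (original_lines : List String) (out : List String) : Prop := out = fix_g4_05_deps_alt original_lines
instance (original_lines : List String) (out : List String) : Decidable (Spec_fix_g4_05_deps original_lines out) := by unfold Spec_fix_g4_05_deps; infer_instance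

-- ===== CLAIM (what is proved, stated in full; the proofs are below) =====
def Claim_equal_fix_g4_05_deps : Prop := ∀ (original_lines : List String), Dom_fix_g4_05_deps original_lines → Spec_fix_g4_05_deps original_lines (fix_g4_05_deps original_lines)

-- ===== LEMMAS AND PROOFS =====

-- once the flag is true, the loop only appends the remaining lines
theorem pv_loop_true (ls : List String) : ∀ (acc : List String),
    ls.foldl pvStepA (acc, true) = (acc ++ ls, true) := by
  induction ls with
  | nil => intro acc; simp
  | cons h t ih =>
    intro acc
    simp [List.foldl_cons, pvStepA, ih]

-- with the flag false, the loop computes acc ++ (B's splice of the remaining lines)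
theorem pv_loop_false (ls : List String) : ∀ (acc : List String),
    (ls.foldl pvStepA (acc, false)).1 = acc ++ fix_g4_05_deps_alt ls := by
  induction ls with
  | nil => intro acc; simp [fix_g4_05_deps_alt]
  | cons h t ih =>
    intro acc
    by_cases hp : PySem.Str.startswith h "Dependencies:" = true
    · simp only [List.foldl_cons, pvStepA, hp, Bool.not_false, Bool.true_and, if_pos,
        fix_g4_05_deps_alt, List.findIdx?_cons, pv_loop_true]
      simp
    · simp only [List.foldl_cons, pvStepA, hp, Bool.false_and, Bool.not_false,
        ]
      rw [if_neg (by simp), ih]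
      simp only [fix_g4_05_deps_alt, List.findIdx?_cons, hp, Bool.false_eq_true,
        reduceIte]
      cases hf : t.findIdx? (fun line => PySem.Str.startswith line "Dependencies:") with
      | none => simp
      | some i => simp [List.take_succ_cons, List.drop_succ_cons]

-- ===== VERDICT (by name: the statement is the Claim_ definition above) =====
theorem fix_g4_05_deps_spec : Claim_equal_fix_g4_05_deps := by
  intro ls _
  show fix_g4_05_deps ls = fix_g4_05_deps_alt ls
  simpa using pv_loop_false ls []
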